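-- pv_equiv track=rewrite | github.com/aaron031291/grace-3.1- | backend/test_url_detection.py | is_downloadable_document
-- ===== SOURCE A (Python) =====
-- def is_downloadable_document(url: str) -> bool:
--     """Check if URL points to a downloadable document for RAG."""
--     document_extensions = [
--         # Documents
--         '.pdf', '.doc', '.docx', '.txt', '.rtf',
--         # Presentations
--         '.ppt', '.pptx', '.odp',
--         # Spreadsheets
--         '.xls', '.xlsx', '.csv', '.ods',
--         # Ebooks
--         '.epub', '.mobi'
--     ]
--
--     url_lower = url.lower()
--     # Check if URL ends with document extension (handle query parameters)
--     for ext in document_extensions: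
--         if ext in url_lower:
--             # Make sure it's actually the file extension, not just part of the path
--             if url_lower.endswith(ext) or f'{ext}?' in url_lower or f'{ext}#' in url_lower:
--                 return True
--     return False
-- ===== SOURCE B (Python) =====
-- DOC_BODIES = {'pdf', 'doc', 'docx', 'txt', 'rtf',
--               'ppt', 'pptx', 'odp',
--               'xls', 'xlsx', 'csv', 'ods',
--               'epub', 'mobi'}
--
--
-- def is_downloadable_document(url: str) -> bool:
--     """Check if URL points to a downloadable document for RAG.
--
--     Single left-to-right scan: at each '.', read the run of letters after it
--     and accept iff that run is a known extension body immediately followed by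
--     '?', '#', or the end of the string.
--     """
--     s = url.lower()
--     n = len(s)
--     for i in range(n):
--         if s[i] == '.':
--             j = i + 1
--             while j < n and s[j].isalpha():
--                 j += 1
--             if s[i + 1:j] in DOC_BODIES and (j == n or s[j] in '?#'):
--                 return True
--     return False
-- ===== Notes on version B (the rewrite author's own statement) =====
-- stated objective: alternative
-- what changed: A runs 14 per-extension substring/endswith searches over the whole URL; B makes one left-to-right scan that at each dot reads the run of letters after it, looks that token up in a set of extension bodies, and accepts iff the run is immediately followed by a query or fragment delimiter or by the end of the string.
import Mathlib
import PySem

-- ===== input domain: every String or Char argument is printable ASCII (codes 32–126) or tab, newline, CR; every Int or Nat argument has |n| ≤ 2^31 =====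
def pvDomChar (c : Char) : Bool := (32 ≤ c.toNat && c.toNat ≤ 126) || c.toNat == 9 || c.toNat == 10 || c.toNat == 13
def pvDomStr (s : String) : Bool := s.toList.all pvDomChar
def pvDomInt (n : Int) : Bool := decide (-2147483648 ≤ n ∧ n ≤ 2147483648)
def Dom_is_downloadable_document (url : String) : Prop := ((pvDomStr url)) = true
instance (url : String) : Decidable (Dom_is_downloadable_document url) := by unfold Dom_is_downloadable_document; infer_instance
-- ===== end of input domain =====

-- B replaces A's 14 per-extension substring searches by ONE left-to-right scan that, at each '.',
-- reads the letter run after it and looks it up in the extension set (objective: alternative).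

-- ===== PORT A =====
def pvExts : List (List Char) :=
  [".pdf".toList, ".doc".toList, ".docx".toList, ".txt".toList, ".rtf".toList,
   ".ppt".toList, ".pptx".toList, ".odp".toList,
   ".xls".toList, ".xlsx".toList, ".csv".toList, ".ods".toList,
   ".epub".toList, ".mobi".toList]

-- A: for each extension, 'ext in url' and then endswith / 'ext?' in url / 'ext#' in url;
-- the early-returning for loop is List.any over the extension list.
def is_downloadable_document (url : String) : Bool :=
  let ul := PySem.Chars.lower url.toList
  pvExts.any (fun ext =>
    PySem.Chars.isIn ext ul &&
      (PySem.Chars.endswith ul ext ||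
       PySem.Chars.isIn (ext ++ ['?']) ul ||
       PySem.Chars.isIn (ext ++ ['#']) ul))

-- ===== PORT B =====
def pvBodies : List (List Char) :=
  ["pdf".toList, "doc".toList, "docx".toList, "txt".toList, "rtf".toList,
   "ppt".toList, "pptx".toList, "odp".toList,
   "xls".toList, "xlsx".toList, "csv".toList, "ods".toList,
   "epub".toList, "mobi".toList]

-- 'j == n or s[j] in "?#"' on the remainder after the letter run
def pvTerm : List Char → Bool
  | [] => true
  | c :: _ => c = '?' || c = '#'

-- Source B's index loop over s, as structural recursion; the inner 'while s[j].isalpha()'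
-- is the takeWhile/dropWhile split of the remainder.
def pvScan : List Char → Bool
  | [] => false
  | c :: rest =>
    if c = '.' then
      (pvBodies.contains (rest.takeWhile (fun d => PySem.Chars.isalpha d)) &&
         pvTerm (rest.dropWhile (fun d => PySem.Chars.isalpha d)))
      || pvScan rest
    else pvScan rest

def is_downloadable_document_alt (url : String) : Bool :=
  pvScan (PySem.Chars.lower url.toList)

-- ===== PRECONDITION & SPEC =====
def Spec_is_downloadable_document (url : String) (out : Bool) : Prop := out = is_downloadable_document_alt url
instance (url : String) (out : Bool) : Decidable (Spec_is_downloadable_document url out) := by unfold Spec_is_downloadable_document; infer_instance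

-- ===== CLAIM (what is proved, stated in full; the proofs are below) =====
def Claim_equal_is_downloadable_document : Prop := ∀ (url : String), Dom_is_downloadable_document url → Spec_is_downloadable_document url (is_downloadable_document url)

-- ===== LEMMAS AND PROOFS =====

-- the extension list is exactly '.' prepended to each body
theorem pvExts_eq_map : pvExts = pvBodies.map (('.' : Char) :: ·) := by decide

theorem pvBodies_alpha : ∀ body ∈ pvBodies, body.all (fun d => PySem.Chars.isalpha d) = true := by
  decide

-- split of takeWhile/dropWhile across body ++ b when body is all-p and b starts non-p
theorem takeWhile_body_append {p : Char → Bool} {body b : List Char}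
    (hall : body.all p = true) (hb : ∀ c ∈ b.head?, p c = false) :
    (body ++ b).takeWhile p = body ∧ (body ++ b).dropWhile p = b := by
  induction body with
  | nil =>
    cases b with
    | nil => simp
    | cons c t =>
      have := hb c rfl
      simp [this]
  | cons x xs ih =>
    simp only [List.all_cons, Bool.and_eq_true] at hall
    have := ih hall.2
    simp [hall.1, this.1, this.2]

theorem pvTerm_head {b : List Char} (h : pvTerm b = true) :
    ∀ c ∈ b.head?, (fun d => PySem.Chars.isalpha d) c = false := by
  intro c hc
  cases b with
  | nil => simp at hc
  | cons x t =>
    simp only [List.head?_cons, Option.mem_some_iff] at hc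
    subst hc
    simp only [pvTerm, Bool.or_eq_true, decide_eq_true_eq] at h
    rcases h with h | h <;> subst h <;> decide

-- characterisation of B's scan
theorem pvScan_iff (L : List Char) :
    pvScan L = true ↔ ∃ a rest, L = a ++ '.' :: rest ∧
      (pvBodies.contains (rest.takeWhile (fun d => PySem.Chars.isalpha d)) &&
        pvTerm (rest.dropWhile (fun d => PySem.Chars.isalpha d))) = true := by
  induction L with
  | nil =>
    constructor
    · intro h; exact absurd h (by simp [pvScan])
    · rintro ⟨a, rest, h, -⟩; exact absurd h (by simp)
  | cons c rest ih =>
    have hstep : pvScan (c :: rest) =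
        (if c = '.' then
          ((pvBodies.contains (rest.takeWhile (fun d => PySem.Chars.isalpha d)) &&
              pvTerm (rest.dropWhile (fun d => PySem.Chars.isalpha d)))
            || pvScan rest)
         else pvScan rest) := rfl
    constructor
    · intro h
      rw [hstep] at h
      by_cases hc : c = '.'
      · rw [if_pos hc, Bool.or_eq_true] at h
        subst hc
        rcases h with h | h
        · exact ⟨[], rest, by simp, h⟩
        · obtain ⟨a, r, hr, hg⟩ := ih.mp h
          exact ⟨'.' :: a, r, by simp [hr], hg⟩
      · rw [if_neg hc] at h
        obtain ⟨a, r, hr, hg⟩ := ih.mp h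
        exact ⟨c :: a, r, by simp [hr], hg⟩
    · rintro ⟨a, r, hr, hg⟩
      rw [hstep]
      cases a with
      | nil =>
        simp only [List.nil_append, List.cons.injEq] at hr
        obtain ⟨h1, h2⟩ := hr
        subst h1; subst h2
        rw [if_pos rfl, hg, Bool.true_or]
      | cons y a' =>
        simp only [List.cons_append, List.cons.injEq] at hr
        obtain ⟨h1, h2⟩ := hr
        subst h1
        have hs : pvScan rest = true := ih.mpr ⟨a', r, h2, hg⟩
        by_cases hy : c = '.'
        · rw [if_pos hy, hs, Bool.or_true]
        · rw [if_neg hy]; exact hs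

-- the matched window, characterised: body in the set, then '?', '#' or end
theorem good_iff (rest : List Char) :
    (pvBodies.contains (rest.takeWhile (fun d => PySem.Chars.isalpha d)) &&
      pvTerm (rest.dropWhile (fun d => PySem.Chars.isalpha d))) = true ↔
    ∃ body ∈ pvBodies, ∃ b, rest = body ++ b ∧ pvTerm b = true := by
  constructor
  · intro h
    simp only [Bool.and_eq_true, List.contains_iff_mem] at h
    exact ⟨_, h.1, _, (List.takeWhile_append_dropWhile).symm, h.2⟩
  · rintro ⟨body, hmem, b, hb, ht⟩
    subst hb
    obtain ⟨h1, h2⟩ := takeWhile_body_append (pvBodies_alpha body hmem) (pvTerm_head ht)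
    simp only [Bool.and_eq_true, List.contains_iff_mem, h1, h2]
    exact ⟨hmem, ht⟩

-- characterisation of A's per-extension test
theorem aTest_iff (L ext : List Char) :
    (PySem.Chars.isIn ext L &&
      (PySem.Chars.endswith L ext ||
       PySem.Chars.isIn (ext ++ ['?']) L ||
       PySem.Chars.isIn (ext ++ ['#']) L)) = true ↔
    (ext <:+ L ∨ (ext ++ ['?']) <:+: L ∨ (ext ++ ['#']) <:+: L) := by
  simp only [Bool.and_eq_true, Bool.or_eq_true, PySem.Chars.isIn_iff_infix,
    PySem.Chars.endswith_iff]
  constructor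
  · rintro ⟨-, h⟩; tauto
  · intro h
    refine ⟨?_, by tauto⟩
    rcases h with h | h | h
    · exact h.isInfix
    · exact (List.prefix_append ext ['?']).isInfix.trans h
    · exact (List.prefix_append ext ['#']).isInfix.trans h

-- A's disjunction at one extension '.'::body ↔ an occurrence 'a ++ . body ++ terminator'
theorem ext_occ_iff (L body : List Char) :
    (('.' :: body) <:+ L ∨ (('.' :: body) ++ ['?']) <:+: L ∨ (('.' :: body) ++ ['#']) <:+: L) ↔
    ∃ a b, L = a ++ '.' :: (body ++ b) ∧ pvTerm b = true := by
  constructor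
  · rintro (⟨a, ha⟩ | ⟨a, b, hab⟩ | ⟨a, b, hab⟩)
    · exact ⟨a, [], by simp [ha.symm], rfl⟩
    · exact ⟨a, '?' :: b, by simp [← hab], rfl⟩
    · exact ⟨a, '#' :: b, by simp [← hab], rfl⟩
  · rintro ⟨a, b, hL, ht⟩
    cases b with
    | nil => exact Or.inl ⟨a, by simp [hL]⟩
    | cons c t =>
      simp only [pvTerm, Bool.or_eq_true, decide_eq_true_eq] at ht
      rcases ht with h | h <;> subst h
      · exact Or.inr (Or.inl ⟨a, t, by simp [hL]⟩)
      · exact Or.inr (Or.inr ⟨a, t, by simp [hL]⟩)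

-- both programs compute the same occurrence predicate on the lowered character list
theorem main_iff (L : List Char) :
    (pvExts.any (fun ext =>
      PySem.Chars.isIn ext L &&
        (PySem.Chars.endswith L ext ||
         PySem.Chars.isIn (ext ++ ['?']) L ||
         PySem.Chars.isIn (ext ++ ['#']) L))) = pvScan L := by
  cases h : pvScan L
  · simp only [List.any_eq_false]
    intro ext hext
    rw [pvExts_eq_map, List.mem_map] at hext
    obtain ⟨body, hb, rfl⟩ := hext
    rw [Bool.not_eq_true]
    rw [← Bool.not_eq_true]
    rw [aTest_iff, ext_occ_iff]
    rintro ⟨a, b, hL, ht⟩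
    have hs : pvScan L = true :=
      (pvScan_iff L).mpr ⟨a, body ++ b, hL, (good_iff _).mpr ⟨body, hb, b, rfl, ht⟩⟩
    rw [h] at hs
    exact absurd hs (by simp)
  · rw [List.any_eq_true]

    obtain ⟨a, rest, hL, hg⟩ := (pvScan_iff L).mp h
    obtain ⟨body, hb, b, rfl, ht⟩ := (good_iff rest).mp hg
    refine ⟨'.' :: body, ?_, ?_⟩
    · rw [pvExts_eq_map, List.mem_map]; exact ⟨body, hb, rfl⟩
    · rw [aTest_iff, ext_occ_iff]; exact ⟨a, b, hL, ht⟩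

-- ===== VERDICT (by name: the statement is the Claim_ definition above) =====
theorem is_downloadable_document_spec : Claim_equal_is_downloadable_document := by
  intro url _
  unfold Spec_is_downloadable_document is_downloadable_document is_downloadable_document_alt
  exact main_iff _
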